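-- pv_equiv track=rewrite | github.com/crsvrinceanu/govee-cloud | custom_components/govee_cloud/switch.py | _is_light
-- ===== SOURCE A (Python) =====
-- from typing import Any
--
-- LIGHT_MARKER_INSTANCES = {
--     "brightness",
--     "colorRgb",
--     "colorTemperatureK",
--     "lightScene",
--     "segmentedColorRgb",
--     "segmentedBrightness",
--     "online",
--     "workMode",
-- }
--
-- LIGHT_CAPABILITY_TYPES = {
--     "devices.capabilities.on_off",
--     "devices.capabilities.range",
--     "devices.capabilities.color_setting",
--     "devices.capabilities.dynamic_scene",
--     "devices.capabilities.mode",
--     "devices.capabilities.work_mode",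
-- }
--
-- def _has_cap(device: dict[str, Any], instance: str) -> bool:
--     return any(cap.get("instance") == instance for cap in device.get("capabilities", []))
--
-- def _is_light(device: dict[str, Any]) -> bool:
--     capabilities = device.get("capabilities", [])
--     if any(cap.get("instance") in LIGHT_MARKER_INSTANCES for cap in capabilities):
--         return True
--     if _has_cap(device, "powerSwitch") and any(
--         cap.get("type") in LIGHT_CAPABILITY_TYPES for cap in capabilities
--     ):
--         return True
--     return False
-- ===== SOURCE B (Python) =====
-- LIGHT_MARKER_INSTANCES = {
--     "brightness",
--     "colorRgb",
--     "colorTemperatureK",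
--     "lightScene",
--     "segmentedColorRgb",
--     "segmentedBrightness",
--     "online",
--     "workMode",
-- }
--
-- LIGHT_CAPABILITY_TYPES = {
--     "devices.capabilities.on_off",
--     "devices.capabilities.range",
--     "devices.capabilities.color_setting",
--     "devices.capabilities.dynamic_scene",
--     "devices.capabilities.mode",
--     "devices.capabilities.work_mode",
-- }
--
--
-- def _is_light(device):
--     # Single recursive pass: short-circuit True on any marker instance, otherwise
--     # carry two flags (saw powerSwitch, saw a light capability type) to the end.
--     def go(caps, has_power, has_type):
--         if not caps:
--             return has_power and has_type
--         cap = caps[0]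
--         inst = cap.get("instance")
--         if inst in LIGHT_MARKER_INSTANCES:
--             return True
--         return go(
--             caps[1:],
--             has_power or inst == "powerSwitch",
--             has_type or cap.get("type") in LIGHT_CAPABILITY_TYPES,
--         )
--
--     return go(device.get("capabilities", []), False, False)
-- ===== Notes on version B (the rewrite author's own statement) =====
-- stated objective: alternative
-- what changed: Replaces A's three separate scans of the capability list (marker scan, _has_cap powerSwitch scan, type scan) with one recursive pass carrying two accumulator flags that returns True immediately on a marker instance and combines the flags at the end.
import Mathlib
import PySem

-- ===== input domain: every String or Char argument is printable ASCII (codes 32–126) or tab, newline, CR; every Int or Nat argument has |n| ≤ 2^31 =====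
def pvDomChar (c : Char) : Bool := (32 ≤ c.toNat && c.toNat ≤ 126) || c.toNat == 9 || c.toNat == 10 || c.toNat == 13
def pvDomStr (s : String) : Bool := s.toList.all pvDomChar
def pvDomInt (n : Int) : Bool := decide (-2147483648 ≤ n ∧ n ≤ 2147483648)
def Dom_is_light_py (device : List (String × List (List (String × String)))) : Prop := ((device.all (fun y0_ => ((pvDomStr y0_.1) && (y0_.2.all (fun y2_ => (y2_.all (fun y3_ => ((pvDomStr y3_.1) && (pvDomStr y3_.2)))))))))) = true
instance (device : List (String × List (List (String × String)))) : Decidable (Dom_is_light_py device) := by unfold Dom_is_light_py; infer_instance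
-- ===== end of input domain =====

-- B replaces A's three scans of the capability list with one recursive pass that
-- short-circuits on a marker instance and carries two accumulator flags (objective: alternative).

-- ===== PORT A =====
def pvMarkers : List String :=
  ["brightness", "colorRgb", "colorTemperatureK", "lightScene",
   "segmentedColorRgb", "segmentedBrightness", "online", "workMode"]

def pvTypes : List String :=
  ["devices.capabilities.on_off", "devices.capabilities.range",
   "devices.capabilities.color_setting", "devices.capabilities.dynamic_scene",
   "devices.capabilities.mode", "devices.capabilities.work_mode"]

-- _has_cap: scans device.get("capabilities", []) for cap.get("instance") == instance
def pvHasCap (device : List (String × List (List (String × String)))) (inst : String) : Bool :=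
  (((PySem.Dict.mk device).get? "capabilities").getD []).any
    (fun cap => (PySem.Dict.mk cap).get? "instance" == some inst)

def is_light_py (device : List (String × List (List (String × String)))) : Bool :=
  let capabilities := ((PySem.Dict.mk device).get? "capabilities").getD []
  if capabilities.any (fun cap =>
      match (PySem.Dict.mk cap).get? "instance" with
      | some s => pvMarkers.contains s
      | none => false) then true
  else if pvHasCap device "powerSwitch" &&
      capabilities.any (fun cap =>
        match (PySem.Dict.mk cap).get? "type" with
        | some s => pvTypes.contains s
        | none => false) then true
  else false

-- ===== PORT B =====
-- go(caps, has_power, has_type) from Source B: early True on a marker instance,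
-- otherwise recurse with the two flags updated; at the end has_power && has_type.
def pvGo : List (List (String × String)) → Bool → Bool → Bool
  | [], hasPower, hasType => hasPower && hasType
  | cap :: rest, hasPower, hasType =>
    let inst := (PySem.Dict.mk cap).get? "instance"
    if (match inst with | some s => pvMarkers.contains s | none => false) then true
    else pvGo rest (hasPower || inst == some "powerSwitch")
          (hasType || (match (PySem.Dict.mk cap).get? "type" with
                       | some s => pvTypes.contains s | none => false))

def is_light_py_alt (device : List (String × List (List (String × String)))) : Bool :=
  pvGo (((PySem.Dict.mk device).get? "capabilities").getD []) false false

-- ===== PRECONDITION & SPEC =====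
def Spec_is_light_py (device : List (String × List (List (String × String)))) (out : Bool) : Prop := out = is_light_py_alt device
instance (device : List (String × List (List (String × String)))) (out : Bool) : Decidable (Spec_is_light_py device out) := by unfold Spec_is_light_py; infer_instance

-- ===== CLAIM (what is proved, stated in full; the proofs are below) =====
def Claim_equal_is_light_py : Prop := ∀ (device : List (String × List (List (String × String)))), Dom_is_light_py device → Spec_is_light_py device (is_light_py device)

-- ===== LEMMAS AND PROOFS =====

-- invariant of B's single pass: the result is "some marker seen, or both flags end up set"
lemma pvGo_eq (caps : List (List (String × String))) (hp ht : Bool) :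
    pvGo caps hp ht
      = (caps.any (fun cap =>
            match (PySem.Dict.mk cap).get? "instance" with
            | some s => pvMarkers.contains s
            | none => false)
         || ((hp || caps.any (fun cap => (PySem.Dict.mk cap).get? "instance" == some "powerSwitch"))
             && (ht || caps.any (fun cap =>
                  match (PySem.Dict.mk cap).get? "type" with
                  | some s => pvTypes.contains s
                  | none => false)))) := by
  induction caps generalizing hp ht with
  | nil => simp [pvGo]
  | cons cap rest ih =>
    simp only [pvGo, List.any_cons]
    cases hm : (match (PySem.Dict.mk cap).get? "instance" with
          | some s => pvMarkers.contains s
          | none => false)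
    · simp only [Bool.false_eq_true, if_false, ih, Bool.false_or, Bool.or_assoc]
    · simp

-- ===== VERDICT (by name: the statement is the Claim_ definition above) =====
theorem is_light_py_spec : Claim_equal_is_light_py := by
  intro device _
  unfold Spec_is_light_py is_light_py is_light_py_alt pvHasCap
  rw [pvGo_eq]
  dsimp only
  split_ifs <;> simp_all; assumption
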